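-- pv_equiv track=rewrite | github.com/HaloSense/EL6463-projects | hw3_testbench/test cases generating scripts/lines_gen.py | lines_gen_dn
-- ===== SOURCE A (Python) =====
-- def lines_gen_dn(mode, cnt_in, for_period):
--     line = ''
--     lines = []
--
--     rst = '0'
--     en = '0'
--     cnt = cnt_in
--
--     for i in range(for_period):
--         if mode == 're':
--             rst = '1'
--             en = '1'
--             cnt = 3
--
--         if mode == 'r':
--             rst = '1'
--             en = '0'
--             cnt = 3
--
--         if mode == 'e':
--             rst = '0'
--             en = '1'
--             cnt -= 1
--             if cnt == -1:
--                 cnt = 65535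
--
--         if mode == 'x':
--             rst = '0'
--             en = '0'
--
--         cnt_out = '{:016b}'.format(cnt)
--         line = ",".join((rst, en, cnt_out))
--         line = "".join((line, "\n"))
--
--         lines.append(line)
--
--     return lines, cnt
-- ===== SOURCE B (Python) =====
-- def lines_gen_dn(mode, cnt_in, for_period):
--     if for_period <= 0:
--         return [], cnt_in
--     if mode == 're':
--         rst, en, cnt = '1', '1', 3
--     elif mode == 'r':
--         rst, en, cnt = '1', '0', 3
--     elif mode == 'e':
--         lines = []
--         cnt = cnt_in
--         for _ in range(for_period):
--             cnt -= 1
--             if cnt == -1: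
--                 cnt = 65535
--             lines.append(",".join(('0', '1', '{:016b}'.format(cnt))) + "\n")
--         return lines, cnt
--     else:  # 'x' and any unrecognised mode: hold rst/en low, counter unchanged
--         rst, en, cnt = '0', '0', cnt_in
--     line = ",".join((rst, en, '{:016b}'.format(cnt))) + "\n"
--     return [line] * for_period, cnt
-- ===== Notes on version B (the rewrite author's own statement) =====
-- stated objective: simpler
-- what changed: B dispatches on mode once before any iteration: the constant modes ('re','r','x' and unrecognised) build the single line once and return it replicated for_period times, and only mode 'e' keeps a loop (decrement with the -1->65535 wrap); this replaces A's per-iteration four-way if cascade and per-iteration string formatting.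
import Mathlib
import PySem

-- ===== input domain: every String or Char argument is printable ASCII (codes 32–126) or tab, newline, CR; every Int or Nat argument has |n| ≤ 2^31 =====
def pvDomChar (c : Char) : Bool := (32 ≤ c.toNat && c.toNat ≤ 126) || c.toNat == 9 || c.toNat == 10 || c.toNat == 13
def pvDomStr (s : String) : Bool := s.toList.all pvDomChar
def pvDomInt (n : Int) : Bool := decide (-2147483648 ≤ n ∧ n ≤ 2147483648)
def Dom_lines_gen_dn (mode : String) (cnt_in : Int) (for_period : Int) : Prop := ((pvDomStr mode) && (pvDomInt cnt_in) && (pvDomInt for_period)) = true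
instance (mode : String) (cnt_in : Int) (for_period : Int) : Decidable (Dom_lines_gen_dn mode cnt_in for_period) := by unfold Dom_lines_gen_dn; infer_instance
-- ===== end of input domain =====

-- B dispatches on `mode` once up front: the constant modes build one line and replicate it
-- for_period times, only mode 'e' keeps a real decrement loop (objective: simpler).


-- shared port of Python's '{:016b}'.format(n): binary digits via PySem.Int.toBinChars,
-- zero-padded to width 16 with the '-' sign kept in front of the padding (exact for every Int)
def pvFmt016 (n : Int) : String :=
  let s := PySem.Int.toBinChars n
  if s.length < 16 then
    if n < 0 then String.ofList ('-' :: (List.replicate (16 - s.length) '0' ++ s.drop 1))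
    else String.ofList (List.replicate (16 - s.length) '0' ++ s)
  else String.ofList s

-- shared port of  line = ",".join((rst, en, cnt_out)); line = "".join((line, "\n"))
def pvMkLine (rst en : String) (cnt : Int) : String :=
  PySem.Str.join "" [PySem.Str.join "," [rst, en, pvFmt016 cnt], "\n"]

-- ===== PORT A =====
-- one iteration of A's for-body (the four sequential if-tests, in order)
def pvStepA (mode : String) (st : String × String × Int × List String) :
    String × String × Int × List String :=
  let (rst, en, cnt, lines) := st
  let (rst, en, cnt) := if mode = "re" then ("1", "1", (3 : Int)) else (rst, en, cnt)
  let (rst, en, cnt) := if mode = "r" then ("1", "0", (3 : Int)) else (rst, en, cnt)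
  let (rst, en, cnt) :=
    if mode = "e" then
      let c := cnt - 1
      ("0", "1", if c = -1 then (65535 : Int) else c)
    else (rst, en, cnt)
  let (rst, en) := if mode = "x" then ("0", "0") else (rst, en)
  let line := pvMkLine rst en cnt
  (rst, en, cnt, lines ++ [line])

def lines_gen_dn (mode : String) (cnt_in : Int) (for_period : Int) : List String × Int :=
  let st := (PySem.List.pyRange 0 for_period 1).foldl (fun s (_ : Int) => pvStepA mode s)
              ("0", "0", cnt_in, ([] : List String))
  (st.2.2.2, st.2.2.1)

-- ===== PORT B =====
-- B's mode-'e' loop: decrement with the -1 → 65535 wrap, one line per cycle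
def pvLoopE (cnt : Int) : Nat → List String × Int
  | 0 => ([], cnt)
  | n + 1 =>
    let c0 := cnt - 1
    let c := if c0 = -1 then (65535 : Int) else c0
    let r := pvLoopE c n
    (pvMkLine "0" "1" c :: r.1, r.2)

def lines_gen_dn_alt (mode : String) (cnt_in : Int) (for_period : Int) : List String × Int :=
  if for_period ≤ 0 then ([], cnt_in)
  else if mode = "re" then (List.replicate for_period.toNat (pvMkLine "1" "1" 3), 3)
  else if mode = "r" then (List.replicate for_period.toNat (pvMkLine "1" "0" 3), 3)
  else if mode = "e" then pvLoopE cnt_in for_period.toNat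
  else (List.replicate for_period.toNat (pvMkLine "0" "0" cnt_in), cnt_in)

-- ===== PRECONDITION & SPEC =====
def Spec_lines_gen_dn (mode : String) (cnt_in : Int) (for_period : Int) (out : List String × Int) : Prop := out = lines_gen_dn_alt mode cnt_in for_period
instance (mode : String) (cnt_in : Int) (for_period : Int) (out : List String × Int) : Decidable (Spec_lines_gen_dn mode cnt_in for_period out) := by unfold Spec_lines_gen_dn; infer_instance

-- ===== CLAIM (what is proved, stated in full; the proofs are below) =====
def Claim_equal_lines_gen_dn : Prop := ∀ (mode : String) (cnt_in : Int) (for_period : Int), Dom_lines_gen_dn mode cnt_in for_period → Spec_lines_gen_dn mode cnt_in for_period (lines_gen_dn mode cnt_in for_period)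

-- ===== LEMMAS AND PROOFS =====

-- fold of a step that sets the whole (rst, en, cnt) part to a constant and appends a fixed line
theorem foldl_const_step (g : String × String × Int × List String → String × String × Int × List String)
    (a b : String) (c : Int) (L : String)
    (hg : ∀ st, g st = (a, b, c, st.2.2.2 ++ [L])) :
    ∀ (l : List Int) (st : String × String × Int × List String),
      l.foldl (fun s (_ : Int) => g s) st =
        if l.length = 0 then st else (a, b, c, st.2.2.2 ++ List.replicate l.length L) := by
  intro l
  induction l with
  | nil => intro st; simp
  | cons x t ih =>
    intro st
    simp only [List.foldl_cons]
    rw [ih, hg]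
    by_cases h : t.length = 0
    · simp [h]
    · simp [h, List.replicate_succ, List.append_assoc]

-- fold of a step that keeps rst = en = "0" and the counter, appending one line per cycle
theorem foldl_keep_step (g : String × String × Int × List String → String × String × Int × List String)
    (f : Int → String)
    (hg : ∀ (c : Int) (ls : List String), g ("0", "0", c, ls) = ("0", "0", c, ls ++ [f c])) :
    ∀ (l : List Int) (c : Int) (ls : List String),
      l.foldl (fun s (_ : Int) => g s) ("0", "0", c, ls) =
        ("0", "0", c, ls ++ List.replicate l.length (f c)) := by
  intro l
  induction l with
  | nil => intro c ls; simp
  | cons x t ih =>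
    intro c ls
    simp only [List.foldl_cons, hg, ih, List.length_cons]
    rw [List.replicate_succ]
    simp

-- fold of A's mode-'e' step computes B's pvLoopE (on the (cnt, lines) part of the state)
theorem foldl_e_step :
    ∀ (l : List Int) (r e : String) (c : Int) (ls : List String),
      ((l.foldl (fun s (_ : Int) => pvStepA "e" s) (r, e, c, ls)).2.2.1,
       (l.foldl (fun s (_ : Int) => pvStepA "e" s) (r, e, c, ls)).2.2.2) =
        ((pvLoopE c l.length).2, ls ++ (pvLoopE c l.length).1) := by
  intro l
  induction l with
  | nil => intro r e c ls; simp [pvLoopE]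
  | cons x t ih =>
    intro r e c ls
    simp only [List.foldl_cons, List.length_cons]
    have hstep : pvStepA "e" (r, e, c, ls) =
        ("0", "1", if c - 1 = -1 then (65535 : Int) else c - 1,
          ls ++ [pvMkLine "0" "1" (if c - 1 = -1 then (65535 : Int) else c - 1)]) := by
      simp [pvStepA]
    rw [hstep, ih]
    simp [pvLoopE]

-- ===== VERDICT (by name: the statement is the Claim_ definition above) =====
theorem lines_gen_dn_spec : Claim_equal_lines_gen_dn := by
  intro mode cnt_in p _
  unfold Spec_lines_gen_dn lines_gen_dn lines_gen_dn_alt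
  by_cases hp : p ≤ 0
  · rw [PySem.List.pyRange_one_eq_nil (by omega)]
    simp [hp]
  · have hlen := PySem.List.length_pyRange_one 0 p
    have hn : (PySem.List.pyRange 0 p 1).length = p.toNat := by omega
    by_cases hre : mode = "re"
    · subst hre
      rw [foldl_const_step _ "1" "1" 3 (pvMkLine "1" "1" 3) (fun st => by simp [pvStepA])]
      simp [Int.toNat_eq_zero, hn, hp]
    · by_cases hr : mode = "r"
      · subst hr
        rw [foldl_const_step _ "1" "0" 3 (pvMkLine "1" "0" 3) (fun st => by simp [pvStepA])]
        simp [Int.toNat_eq_zero, hn, hp]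
      · by_cases he : mode = "e"
        · subst he
          have h := foldl_e_step (PySem.List.pyRange 0 p 1) "0" "0" cnt_in []
          rw [hn] at h
          simp only [List.nil_append] at h
          simp only [hp, if_false, if_neg hre, if_neg hr]
          exact Prod.ext (congrArg Prod.snd h) (congrArg Prod.fst h)
        · have hx : ∀ (c : Int) (ls : List String),
              pvStepA mode ("0", "0", c, ls) = ("0", "0", c, ls ++ [pvMkLine "0" "0" c]) := by
            intro c ls
            by_cases hxx : mode = "x" <;> simp [pvStepA, hre, hr, he, hxx]
          rw [foldl_keep_step _ (pvMkLine "0" "0") hx]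
          simp [hp, hre, hr, he, hn]
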